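-- pv_equiv track=rewrite | github.com/Kris465/MemoryBox | RPO/block9/task159.py | unique_common_letters
-- ===== SOURCE A (Python) =====
-- def unique_common_letters(word1, word2):
--     word1 = word1.lower()
--     word2 = word2.lower()
--     count1 = {}
--     count2 = {}
--     for letter in word1:
--         count1[letter] = count1.get(letter, 0) + 1
--     for letter in word2:
--         count2[letter] = count2.get(letter, 0) + 1
--     result = []
--     for letter in count1:
--         if count1[letter] == 1 and letter in count2 and count2[letter] == 1:
--             result.append(letter)
--     return ' '.join(result)
-- ===== SOURCE B (Python) =====
-- def unique_common_letters(word1, word2):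
--     def singles(w):
--         once, dup = [], set()
--         for c in w.lower():
--             if c in dup:
--                 continue
--             if c in once:
--                 once.remove(c)
--                 dup.add(c)
--             else:
--                 once.append(c)
--         return once
--     s2 = set(singles(word2))
--     return ' '.join(c for c in singles(word1) if c in s2)
-- ===== Notes on version B (the rewrite author's own statement) =====
-- stated objective: alternative
-- what changed: Replaces A's frequency-dict counting entirely with a count-free single-pass state machine per word that maintains an ordered 'seen once' list and a 'seen more than once' set (promoting a repeated letter out of the list), then intersects the two once-lists; the once-list is already in first-appearance order so no counting or key-iteration pass exists.
import Mathlib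
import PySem

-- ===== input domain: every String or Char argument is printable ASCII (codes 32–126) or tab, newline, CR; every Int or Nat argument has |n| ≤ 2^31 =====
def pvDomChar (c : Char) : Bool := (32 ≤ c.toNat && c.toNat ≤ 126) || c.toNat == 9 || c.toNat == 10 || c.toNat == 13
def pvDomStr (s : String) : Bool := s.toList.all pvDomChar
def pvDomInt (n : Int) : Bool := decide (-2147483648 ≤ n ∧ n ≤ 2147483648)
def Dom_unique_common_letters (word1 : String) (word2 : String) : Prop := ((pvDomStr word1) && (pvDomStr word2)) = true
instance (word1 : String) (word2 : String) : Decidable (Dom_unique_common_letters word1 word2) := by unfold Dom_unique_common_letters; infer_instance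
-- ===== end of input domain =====

-- B replaces A's frequency-dict counting with a count-free single-pass state machine
-- per word (ordered once-list + seen-twice set, repeated letters promoted out of the
-- list) and intersects the two once-lists (objective: alternative).

-- ===== PORT A =====
-- literal port of A: lower both words, build two count dicts with get(...,0)+1,
-- then iterate count1's keys appending letters with count 1 in both, joined by ' '
def unique_common_letters (word1 : String) (word2 : String) : String :=
  let w1 := (PySem.Str.lower word1).toList
  let w2 := (PySem.Str.lower word2).toList
  let count1 := w1.foldl (fun d letter => d.insert letter (d.getD letter 0 + 1)) (PySem.Dict.empty : PySem.Dict Char Int)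
  let count2 := w2.foldl (fun d letter => d.insert letter (d.getD letter 0 + 1)) (PySem.Dict.empty : PySem.Dict Char Int)
  let result := count1.keys.foldl
    (fun r letter =>
      if count1.getD letter 0 == 1 && (count2.contains letter && count2.getD letter 0 == 1)
      then r ++ [letter] else r) ([] : List Char)
  String.mk (PySem.Chars.join [' '] (result.map (fun c => [c])))

-- ===== PORT B =====
-- one step of B's state machine: state = (once : ordered list, dup : set);
-- `once.remove(c)` is guarded by `c in once`, so PySem.List.remove? is always some
def pvSinglesGo (st : List Char × PySem.Set Char) (c : Char) : List Char × PySem.Set Char :=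
  if PySem.Set.contains st.2 c then st
  else if st.1.contains c then
    ((match PySem.List.remove? st.1 c with | some l => l | none => st.1), PySem.Set.add st.2 c)
  else (st.1 ++ [c], st.2)

-- B's helper singles(w): fold the state machine over w.lower(), return the once-list
def pvSingles (w : String) : List Char :=
  ((PySem.Str.lower w).toList.foldl pvSinglesGo ([], PySem.Set.empty)).1

-- port of B: s2 = set(singles(word2)); join the once-list of word1 filtered by s2-membership
def unique_common_letters_alt (word1 : String) (word2 : String) : String :=
  let s2 := PySem.Set.ofList (pvSingles word2)
  String.mk (PySem.Chars.join [' ']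
    (((pvSingles word1).filter (fun c => PySem.Set.contains s2 c)).map (fun c => [c])))

-- ===== PRECONDITION & SPEC =====
def Spec_unique_common_letters (word1 : String) (word2 : String) (out : String) : Prop := out = unique_common_letters_alt word1 word2
instance (word1 : String) (word2 : String) (out : String) : Decidable (Spec_unique_common_letters word1 word2 out) := by unfold Spec_unique_common_letters; infer_instance

-- ===== CLAIM (what is proved, stated in full; the proofs are below) =====
def Claim_equal_unique_common_letters : Prop := ∀ (word1 : String) (word2 : String), Dom_unique_common_letters word1 word2 → Spec_unique_common_letters word1 word2 (unique_common_letters word1 word2)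

-- ===== LEMMAS AND PROOFS =====
-- A's filter predicate (counts read back from the counters, as Int, with the membership
-- test) agrees pointwise with the plain Nat-count predicate.
lemma core_pred (l1 l2 : List Char) (c : Char) :
    (((l1.count c : Int) == 1) && (l2.contains c && ((l2.count c : Int) == 1)))
      = (l1.count c == 1 && l2.count c == 1) := by
  by_cases h1 : l1.count c = 1
  · by_cases h2 : l2.count c = 1
    · have hmem : c ∈ l2 := List.count_pos_iff.mp (by omega)
      simp [h1, h2, hmem]
    · have hb : ((l2.count c : Int) == 1) = false := by simp; omega
      simp [h1, h2, hb]
  · have hb : ((l1.count c : Int) == 1) = false := by simp; omega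
    simp [h1, hb]

lemma ofList_append_one (p : List Char) (x : Char) :
    PySem.Set.ofList (p ++ [x]) = PySem.Set.add (PySem.Set.ofList p) x := by
  simp [PySem.Set.ofList_eq_foldl, List.foldl_append]

-- the state-machine invariant: after processing prefix p (from the start), the once-list
-- is the first-appearance-ordered list of letters occurring exactly once in p, and the
-- dup set contains exactly the letters occurring at least twice in p.
lemma singles_inv (l : List Char) : ∀ (p once : List Char) (dup : PySem.Set Char),
    once = (PySem.Set.ofList p).filter (fun c => p.count c == 1) →
    (∀ c, PySem.Set.contains dup c = decide (2 ≤ p.count c)) →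
    (List.foldl pvSinglesGo (once, dup) l).1
      = (PySem.Set.ofList (p ++ l)).filter (fun c => (p ++ l).count c == 1) := by
  induction l with
  | nil => intro p once dup ho _; simpa using ho
  | cons x xs ih =>
    intro p once dup ho hd
    simp only [List.foldl_cons]
    have hre : p ++ x :: xs = (p ++ [x]) ++ xs := by simp
    rw [hre]
    by_cases h2 : 2 ≤ p.count x
    · -- x already seen ≥ twice: state unchanged
      have hc : x ∈ dup := by
        have := hd x; simp [PySem.Set.contains] at this; exact this.mpr (by omega)
      have hstep : pvSinglesGo (once, dup) x = (once, dup) := by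
        simp [pvSinglesGo, hc]
      rw [hstep]
      apply ih
      · rw [ho, ofList_append_one]
        have hxmem : x ∈ PySem.Set.ofList p := by
          rw [PySem.Set.mem_ofList]; exact List.count_pos_iff.mp (by omega)
        have hadd : PySem.Set.add (PySem.Set.ofList p) x = PySem.Set.ofList p := by
          simp [PySem.Set.add, PySem.Set.contains, hxmem]
        rw [hadd]
        apply List.filter_congr
        intro c _
        rcases eq_or_ne c x with rfl | hne
        · have : List.count c (p ++ [c]) = p.count c + 1 := by simp
          simp only [this]
          simp; omega
        · have : List.count c (p ++ [x]) = p.count c := by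
            simp [List.count_append, List.count_singleton, Ne.symm hne]
          rw [this]
      · intro c
        rw [hd]
        rcases eq_or_ne c x with rfl | hne
        · have : List.count c (p ++ [c]) = p.count c + 1 := by simp
          rw [this, decide_eq_decide]; omega
        · have : List.count c (p ++ [x]) = p.count c := by
            simp [List.count_append, List.count_singleton, Ne.symm hne]
          rw [this]
    · by_cases h1 : p.count x = 1
      · -- x seen exactly once: remove it from once, add to dup
        have hcd : x ∉ dup := by
          intro hm
          have h' := hd x; simp [PySem.Set.contains, hm] at h'; omega
        have hxmem : x ∈ PySem.Set.ofList p := by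
          rw [PySem.Set.mem_ofList]; exact List.count_pos_iff.mp (by omega)
        have hxo : x ∈ once := by
          rw [ho, List.mem_filter]; exact ⟨hxmem, by simp [h1]⟩
        have hrem : PySem.List.remove? once x = some (once.erase x) :=
          PySem.List.remove?_eq_some_erase once x hxo
        have hstep : pvSinglesGo (once, dup) x = (once.erase x, PySem.Set.add dup x) := by
          simp [pvSinglesGo, hcd, hxo, hrem]
        rw [hstep]
        apply ih
        · have hnd : once.Nodup := ho ▸ (PySem.Set.nodup_ofList p).filter _
          rw [List.Nodup.erase_eq_filter hnd, ho, List.filter_filter]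
          rw [ofList_append_one]
          have hadd : PySem.Set.add (PySem.Set.ofList p) x = PySem.Set.ofList p := by
            simp [PySem.Set.add, PySem.Set.contains, hxmem]
          rw [hadd]
          apply List.filter_congr
          intro c _
          rcases eq_or_ne c x with rfl | hne
          · have : List.count c (p ++ [c]) = p.count c + 1 := by simp
            rw [this]; simp [h1]
          · have : List.count c (p ++ [x]) = p.count c := by
              simp [List.count_append, List.count_singleton, Ne.symm hne]
            rw [this]; simp [hne]
        · intro c
          rcases eq_or_ne c x with rfl | hne
          · have h' : List.count c (p ++ [c]) = p.count c + 1 := by simp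
            have : PySem.Set.contains (PySem.Set.add dup c) c = true := by
              simp [PySem.Set.contains, PySem.Set.mem_add]
            rw [this, h', eq_comm, decide_eq_true_iff]; omega
          · have h' : List.count c (p ++ [x]) = p.count c := by
              simp [List.count_append, List.count_singleton, Ne.symm hne]
            have : PySem.Set.contains (PySem.Set.add dup x) c = PySem.Set.contains dup c := by
              simp [PySem.Set.contains, PySem.Set.mem_add, hne]
            rw [this, h', hd]
      · -- x unseen: append to once
        have h0 : p.count x = 0 := by omega
        have hcd : x ∉ dup := by
          intro hm
          have h' := hd x; simp [PySem.Set.contains, hm] at h'; omega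
        have hxnmem : x ∉ PySem.Set.ofList p := by
          rw [PySem.Set.mem_ofList]
          intro hm
          have := List.count_pos_iff.mpr hm
          omega
        have hxo : x ∉ once := by
          rw [ho, List.mem_filter]; intro h; exact hxnmem h.1
        have hstep : pvSinglesGo (once, dup) x = (once ++ [x], dup) := by
          simp [pvSinglesGo, hcd, hxo]
        rw [hstep]
        apply ih
        · rw [ofList_append_one]
          have hadd : PySem.Set.add (PySem.Set.ofList p) x = PySem.Set.ofList p ++ [x] := by
            simp [PySem.Set.add, PySem.Set.contains, hxnmem]
          rw [hadd, List.filter_append]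
          have hfa : List.filter (fun c => (p ++ [x]).count c == 1) (PySem.Set.ofList p)
              = List.filter (fun c => p.count c == 1) (PySem.Set.ofList p) := by
            apply List.filter_congr
            intro c hc
            have hne : c ≠ x := fun h => hxnmem (h ▸ hc)
            have : List.count c (p ++ [x]) = p.count c := by
              simp [List.count_append, List.count_singleton, Ne.symm hne]
            rw [this]
          have hfx : List.filter (fun c => (p ++ [x]).count c == 1) [x] = [x] := by
            have : List.count x (p ++ [x]) = 1 := by simp [List.count_append, h0]
            simp [List.filter, this]
          rw [hfa, hfx, ho]
        · intro c
          rw [hd]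
          rcases eq_or_ne c x with rfl | hne
          · have : List.count c (p ++ [c]) = p.count c + 1 := by simp
            rw [this, decide_eq_decide]; omega
          · have : List.count c (p ++ [x]) = p.count c := by
              simp [List.count_append, List.count_singleton, Ne.symm hne]
            rw [this]

-- characterization of B's helper
lemma singles_eq (w : String) :
    pvSingles w = (PySem.Set.ofList (PySem.Str.lower w).toList).filter
      (fun c => (PySem.Str.lower w).toList.count c == 1) := by
  unfold pvSingles
  have := singles_inv ((PySem.Str.lower w).toList) [] [] PySem.Set.empty
    (by simp [PySem.Set.ofList]) (by intro c; simp [PySem.Set.empty, PySem.Set.contains])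
  simpa using this

-- ===== VERDICT (by name: the statement is the Claim_ definition above) =====
theorem unique_common_letters_spec : Claim_equal_unique_common_letters := by
  intro word1 word2 _
  unfold Spec_unique_common_letters
  unfold unique_common_letters unique_common_letters_alt
  simp only [PySem.Dict.foldl_insert_getD_add_one_eq_counter]
  simp only [PySem.List.foldl_append_if (f := fun (c : Char) => c), List.nil_append,
    PySem.Dict.keys_counter, PySem.Dict.getD_counter, PySem.Dict.contains_counter]
  simp only [List.map_id']
  set l1 := (PySem.Str.lower word1).toList with hl1
  set l2 := (PySem.Str.lower word2).toList with hl2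
  have hA : List.filter
      (fun letter => ((l1.count letter : Int) == 1) && (l2.contains letter && ((l2.count letter : Int) == 1)))
      (PySem.Set.ofList l1)
      = List.filter (fun c => l1.count c == 1 && l2.count c == 1) (PySem.Set.ofList l1) :=
    List.filter_congr (fun c _ => core_pred l1 l2 c)
  rw [hA]
  have hB : List.filter (fun c => PySem.Set.contains (PySem.Set.ofList (pvSingles word2)) c) (pvSingles word1)
      = List.filter (fun c => l1.count c == 1 && l2.count c == 1) (PySem.Set.ofList l1) := by
    rw [singles_eq word1, singles_eq word2, ← hl1, ← hl2, List.filter_filter]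
    apply List.filter_congr
    intro c hc
    by_cases h2 : l2.count c = 1
    · have hm2 : c ∈ l2 := List.count_pos_iff.mp (by omega)
      simp [PySem.Set.contains, PySem.Set.mem_ofList, List.mem_filter, hm2, h2]
    · simp only [PySem.Set.contains, PySem.Set.mem_ofList]
      simp [List.mem_filter, h2]
  rw [hB]
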